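-- pv_equiv track=rewrite | github.com/chwilko/WeirdText | WeirdText.py | constants_index
-- ===== SOURCE A (Python) =====
-- from string import whitespace, punctuation
--
-- def constants_index(text, separators_only = whitespace + punctuation):
--     """Function return index first mark with separator_only in text.
--     If in text is not mark with separator_only then return -1
--
--     Args:
--         text (string): text in wich search mark with separator_only
--         separators_only (string, optional): string of marks. Defaults to whitespace+punctuation.
--
--     Returns:
--         int: index first mark with separator_only in text
--     """
--     index = -1
--     for space in separators_only:
--         try:
--             if index == -1:
--                 current = text.index(space)
--             else:
--                 current = text[:index].index(space)
--             if index == -1 or current < index: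
--                 index = current
--         except ValueError:
--             continue
--     return index
-- ===== SOURCE B (Python) =====
-- from string import whitespace, punctuation
--
-- def constants_index(text, separators_only = whitespace + punctuation):
--     """Single left-to-right scan of text: return the first position whose
--     character belongs to separators_only, or -1 if none does."""
--     seps = set(separators_only)
--     for i, ch in enumerate(text):
--         if ch in seps:
--             return i
--     return -1
-- ===== Notes on version B (the rewrite author's own statement) =====
-- stated objective: faster
-- what changed: B replaces A's loop over separator characters with repeated text.index scans (and prefix re-scans) by a single left-to-right pass over text testing each character against a set built once from separators_only.
import Mathlib
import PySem

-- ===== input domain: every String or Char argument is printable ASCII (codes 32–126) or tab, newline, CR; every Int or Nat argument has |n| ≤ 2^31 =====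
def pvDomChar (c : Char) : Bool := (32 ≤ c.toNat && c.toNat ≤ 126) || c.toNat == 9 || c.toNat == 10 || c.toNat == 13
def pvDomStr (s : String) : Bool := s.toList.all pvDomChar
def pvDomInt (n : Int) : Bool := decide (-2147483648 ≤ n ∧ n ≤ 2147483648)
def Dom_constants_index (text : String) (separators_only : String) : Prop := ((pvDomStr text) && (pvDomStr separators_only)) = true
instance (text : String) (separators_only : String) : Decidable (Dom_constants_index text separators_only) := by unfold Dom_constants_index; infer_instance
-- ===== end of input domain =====

-- B replaces A's per-separator repeated scans of text by one left-to-right pass over text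
-- against a set of separators built once (objective: faster; return values proved equal).

-- ===== PORT A =====
-- loop body of A: try text.index / text[:index].index, ValueError ↦ none
def pvStepA (tl : List Char) (index : Int) (space : Char) : Int :=
  let sub := if index == -1 then tl else PySem.List.slice tl none (some index)
  match PySem.List.index? sub space with
  | none => index
  | some current => if index == -1 || (current : Int) < index then (current : Int) else index

def constants_index (text : String) (separators_only : String) : Int :=
  separators_only.toList.foldl (pvStepA text.toList) (-1)

-- ===== PORT B =====
-- single scan with enumerate counter i; early return at the first separator hit
def pvScanB (seps : PySem.Set Char) : List Char → Int → Int
  | [], _ => -1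
  | c :: rest, i => if PySem.Set.contains seps c then i else pvScanB seps rest (i + 1)

def constants_index_alt (text : String) (separators_only : String) : Int :=
  pvScanB (PySem.Set.ofList separators_only.toList) text.toList 0

-- ===== PRECONDITION & SPEC =====
def Spec_constants_index (text : String) (separators_only : String) (out : Int) : Prop := out = constants_index_alt text separators_only
instance (text : String) (separators_only : String) (out : Int) : Decidable (Spec_constants_index text separators_only out) := by unfold Spec_constants_index; infer_instance

-- ===== CLAIM (what is proved, stated in full; the proofs are below) =====
def Claim_equal_constants_index : Prop := ∀ (text : String) (separators_only : String), Dom_constants_index text separators_only → Spec_constants_index text separators_only (constants_index text separators_only)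

-- ===== LEMMAS AND PROOFS =====

def pvToI : Option Nat → Int
  | none => -1
  | some j => (j : Int)

def pvOmin : Option Nat → Option Nat → Option Nat
  | none, o => o
  | some j, none => some j
  | some j, some k => some (min j k)

theorem findIdx?_or {α : Type} (t : List α) (p q : α → Bool) :
    t.findIdx? (fun c => p c || q c) = pvOmin (t.findIdx? p) (t.findIdx? q) := by
  induction t with
  | nil => simp [pvOmin]
  | cons a t ih =>
    by_cases hp : p a <;> by_cases hq : q a <;>
        simp only [List.findIdx?_cons, hp, hq, Bool.true_or, Bool.or_true, Bool.false_or,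
          Bool.or_false, cond_true, cond_false, ih] <;>
      cases t.findIdx? p <;> cases t.findIdx? q <;> simp [pvOmin] <;> omega

theorem findIdx?_take {α : Type} (t : List α) (p : α → Bool) (n : Nat) :
    (t.take n).findIdx? p =
      (match t.findIdx? p with
       | some i => if i < n then some i else none
       | none => none) := by
  induction t generalizing n with
  | nil => cases n <;> simp
  | cons a t ih =>
    cases n with
    | zero =>
      simp only [List.take_zero, List.findIdx?_nil, List.findIdx?_cons]
      by_cases hp : p a
      · simp [hp]
      · simp [hp]; cases t.findIdx? p <;> simp
    | succ n =>
      simp only [List.take_succ_cons, List.findIdx?_cons]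
      by_cases hp : p a
      · simp [hp]
      · simp only [hp, cond_false, ih]
        cases t.findIdx? p with
        | none => simp
        | some i =>
          by_cases hin : i < n <;> simp [hin] <;> omega

theorem index?_eq_findIdx? {α : Type} [BEq α] (t : List α) (v : α) :
    PySem.List.index? t v = t.findIdx? (fun c => c == v) := by
  rw [PySem.List.index?_eq_idxOf?, List.idxOf?]

-- the crux: one iteration of A's loop merges the separator s into the running minimum
theorem stepA_eq (t : List Char) (p : Char → Bool) (s : Char) :
    pvStepA t (pvToI (t.findIdx? p)) s =
      pvToI (t.findIdx? (fun c => p c || (c == s))) := by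
  rw [findIdx?_or]
  cases hP : t.findIdx? p with
  | none =>
    simp only [pvToI, pvStepA, pvOmin]
    rw [show ((-1 : Int) == -1) = true from rfl, index?_eq_findIdx?]
    simp only [if_true, cond_true]
    cases hQ : t.findIdx? (fun c => c == s)
    · rfl
    · simp
  | some j =>
    have hj : ((j : Int) == -1) = false := by simp
    simp only [pvToI, pvStepA, pvOmin, hj, Bool.false_or]
    rw [if_neg (by simp), PySem.List.slice_to_natCast, index?_eq_findIdx?, findIdx?_take]
    cases hQ : t.findIdx? (fun c => c == s) with
    | none => simp [pvToI]
    | some k =>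
      by_cases hk : k < j
      · have hd : decide ((k : Int) < (j : Int)) = true := by simp; exact_mod_cast hk
        simp [hk, hd, pvToI, Nat.min_eq_right (Nat.le_of_lt hk)]
      · have hjk : j ≤ k := by omega
        simp [hk, Nat.min_eq_left hjk]

theorem foldA_eq (t : List Char) (seps : List Char) (P : List Char) :
    seps.foldl (pvStepA t) (pvToI (t.findIdx? (fun c => decide (c ∈ P)))) =
      pvToI (t.findIdx? (fun c => decide (c ∈ P ++ seps))) := by
  induction seps generalizing P with
  | nil => simp
  | cons s rest ih =>
    have hpred : (fun c => decide (c ∈ P) || (c == s)) = (fun c => decide (c ∈ P ++ [s])) := by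
      funext c
      by_cases h1 : c = s <;> by_cases h2 : c ∈ P <;> simp [h1, h2, List.mem_append]
    rw [List.foldl_cons, stepA_eq, hpred, ih]
    simp

theorem scanB_eq (seps : PySem.Set Char) (l : List Char) (i : Int) :
    pvScanB seps l i =
      (match l.findIdx? (fun c => PySem.Set.contains seps c) with
       | none => -1
       | some j => i + (j : Int)) := by
  induction l generalizing i with
  | nil => rfl
  | cons c rest ih =>
    show (if PySem.Set.contains seps c then i else pvScanB seps rest (i + 1)) = _
    rw [List.findIdx?_cons]
    cases hcb : PySem.Set.contains seps c with
    | true => simp [hcb]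
    | false =>
      simp only [hcb, Bool.false_eq_true, if_false, cond_false, ih]
      cases rest.findIdx? (fun c => PySem.Set.contains seps c) with
      | none => rfl
      | some j => simp only [Option.map_some]; push_cast; ring

-- ===== VERDICT (by name: the statement is the Claim_ definition above) =====
theorem constants_index_spec : Claim_equal_constants_index := by
  intro text separators_only _
  unfold Spec_constants_index constants_index constants_index_alt
  have hnone : text.toList.findIdx? (fun c => decide (c ∈ ([] : List Char))) = none := by
    simp
  have hbase : (-1 : Int) = pvToI (text.toList.findIdx? (fun c => decide (c ∈ ([] : List Char)))) := by
    rw [hnone]; rfl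
  rw [hbase, foldA_eq, scanB_eq]
  have hpred : (fun c => PySem.Set.contains (PySem.Set.ofList separators_only.toList) c) =
      (fun c => decide (c ∈ ([] : List Char) ++ separators_only.toList)) := by
    funext c
    by_cases h : c ∈ separators_only.toList <;>
      simp [PySem.Set.contains, PySem.Set.mem_ofList, h]
  rw [hpred]
  cases text.toList.findIdx? (fun c => decide (c ∈ ([] : List Char) ++ separators_only.toList)) <;>
    simp [pvToI]
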